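-- pv_equiv track=rewrite | github.com/LoyanLi/Presto | presto/app/ai_rename_service.py | _detect_vocal_category_ids
-- ===== SOURCE A (Python) =====
-- def _detect_vocal_category_ids(category_map: dict[str, tuple[str, int]]) -> tuple[str | None, str | None]:
--     lead_id: str | None = None
--     bgv_id: str | None = None
--
--     for category_id, (category_name, _slot) in category_map.items():
--         probe = f"{category_id} {category_name}".lower().replace(" ", "")
--         if bgv_id is None and any(
--             key in probe for key in ("bgv", "backup", "backing", "harmony", "double", "choir", "和声", "叠唱")
--         ):
--             bgv_id = category_id
--             continue
--         if lead_id is None and any(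
--             key in probe for key in ("leadvox", "leadvocal", "lead", "vocal", "vox", "主唱")
--         ):
--             lead_id = category_id
--
--     return lead_id, bgv_id
-- ===== SOURCE B (Python) =====
-- _BGV_KEYS = ("bgv", "backup", "backing", "harmony", "double", "choir", "和声", "叠唱")
-- _LEAD_KEYS = ("leadvox", "leadvocal", "lead", "vocal", "vox", "主唱")
--
--
-- def _probe(category_id, category_name):
--     return f"{category_id} {category_name}".lower().replace(" ", "")
--
--
-- def _detect_vocal_category_ids(category_map: dict[str, tuple[str, int]]) -> tuple[str | None, str | None]:
--     # Pass 1: bgv is the first category whose probe matches a bgv keyword.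
--     bgv_id = next(
--         (cid for cid, (name, _slot) in category_map.items()
--          if any(key in _probe(cid, name) for key in _BGV_KEYS)),
--         None,
--     )
--     # Pass 2: lead is the first remaining category whose probe matches a lead keyword.
--     lead_id = next(
--         (cid for cid, (name, _slot) in category_map.items()
--          if cid != bgv_id and any(key in _probe(cid, name) for key in _LEAD_KEYS)),
--         None,
--     )
--     return lead_id, bgv_id
-- ===== Notes on version B (the rewrite author's own statement) =====
-- stated objective: alternative
-- what changed: Replaces A's single interleaved stateful loop (with its continue-skip of the bgv winner) by two independent first-match scans: bgv = first category matching a bgv keyword, lead = first category with a different id matching a lead keyword; Pre_ excludes duplicate-id association lists, which no Python dict input can represent.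
import Mathlib
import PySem

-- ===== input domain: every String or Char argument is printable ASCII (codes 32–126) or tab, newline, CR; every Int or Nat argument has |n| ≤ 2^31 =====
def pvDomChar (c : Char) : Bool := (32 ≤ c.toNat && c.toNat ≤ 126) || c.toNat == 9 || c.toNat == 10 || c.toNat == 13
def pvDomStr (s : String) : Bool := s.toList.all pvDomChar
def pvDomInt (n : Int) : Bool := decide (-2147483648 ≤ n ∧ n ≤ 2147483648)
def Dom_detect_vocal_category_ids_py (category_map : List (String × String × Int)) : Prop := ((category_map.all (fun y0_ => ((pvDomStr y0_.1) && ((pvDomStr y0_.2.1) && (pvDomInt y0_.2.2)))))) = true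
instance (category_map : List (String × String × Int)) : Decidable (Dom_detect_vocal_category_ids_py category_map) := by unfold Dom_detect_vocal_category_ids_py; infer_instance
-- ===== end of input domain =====

-- B replaces A's single interleaved stateful loop by two independent first-match scans
-- (bgv first, then lead excluding the bgv winner's id): a different decomposition, same cost.


-- ===== PORT A =====
-- probe = f"{category_id} {category_name}".lower().replace(" ", "")  (both Pythons build it identically)
def pvProbe (cid name : String) : List Char :=
  PySem.Chars.replace (PySem.Chars.lower (cid.toList ++ ' ' :: name.toList)) [' '] []

def pvBgvKeys : List (List Char) :=
  ["bgv".toList, "backup".toList, "backing".toList, "harmony".toList,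
   "double".toList, "choir".toList, "和声".toList, "叠唱".toList]

def pvLeadKeys : List (List Char) :=
  ["leadvox".toList, "leadvocal".toList, "lead".toList, "vocal".toList, "vox".toList, "主唱".toList]

-- any(key in probe for key in …)
def pvBgvMatch (e : String × String × Int) : Bool :=
  pvBgvKeys.any (fun k => PySem.Chars.isIn k (pvProbe e.1 e.2.1))

def pvLeadMatch (e : String × String × Int) : Bool :=
  pvLeadKeys.any (fun k => PySem.Chars.isIn k (pvProbe e.1 e.2.1))

-- A's loop body: state = (lead_id, bgv_id); 'continue' = the elif structure below
def pvStepA (st : Option String × Option String) (e : String × String × Int) :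
    Option String × Option String :=
  if st.2.isNone && pvBgvMatch e then (st.1, some e.1)
  else if st.1.isNone && pvLeadMatch e then (some e.1, st.2)
  else st

def detect_vocal_category_ids_py (category_map : List (String × String × Int)) :
    Option String × Option String :=
  category_map.foldl pvStepA (none, none)

-- ===== PORT B =====
def detect_vocal_category_ids_py_alt (category_map : List (String × String × Int)) :
    Option String × Option String :=
  let bgv_id := (category_map.find? pvBgvMatch).map (fun e => e.1)
  let lead_id := (category_map.find? (fun e => (some e.1 != bgv_id) && pvLeadMatch e)).map (fun e => e.1)
  (lead_id, bgv_id)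

-- ===== PRECONDITION & SPEC =====
-- Pre_ excludes lists with duplicate category ids: the Python function receives a dict, so
-- duplicate-id association lists never reach it as written (dict construction collapses them),
-- and the assoc-list reading of such inputs is accidental.
def Pre_detect_vocal_category_ids_py (category_map : List (String × String × Int)) : Prop :=
  (category_map.map (fun e => e.1)).Nodup
instance (category_map : List (String × String × Int)) : Decidable (Pre_detect_vocal_category_ids_py category_map) := by unfold Pre_detect_vocal_category_ids_py; infer_instance

def pvWitness_detect_vocal_category_ids_py : (List (String × String × Int)) :=
  [("lead", "Lead Vox", 0), ("bgv", "Backing", 1)]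

def Spec_detect_vocal_category_ids_py (category_map : List (String × String × Int)) (out : Option String × Option String) : Prop := out = detect_vocal_category_ids_py_alt category_map
instance (category_map : List (String × String × Int)) (out : Option String × Option String) : Decidable (Spec_detect_vocal_category_ids_py category_map out) := by unfold Spec_detect_vocal_category_ids_py; infer_instance

-- ===== CLAIM (what is proved, stated in full; the proofs are below) =====
def Claim_equal_detect_vocal_category_ids_py : Prop := ∀ (category_map : List (String × String × Int)), Dom_detect_vocal_category_ids_py category_map → Pre_detect_vocal_category_ids_py category_map → Spec_detect_vocal_category_ids_py category_map (detect_vocal_category_ids_py category_map)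

-- ===== LEMMAS AND PROOFS =====
-- Once both slots are filled the loop never changes state.
theorem pv_foldl_both_some (l : List (String × String × Int)) (a b : String) :
    l.foldl pvStepA (some a, some b) = (some a, some b) := by
  induction l with
  | nil => rfl
  | cons e t ih => simpa [pvStepA] using ih

-- With lead already set, the rest of the loop only searches for the first bgv match.
theorem pv_foldl_lead_some (l : List (String × String × Int)) (a : String) :
    l.foldl pvStepA (some a, none) = (some a, (l.find? pvBgvMatch).map (fun e => e.1)) := by
  induction l with
  | nil => rfl
  | cons e t ih =>
    by_cases h : pvBgvMatch e = true
    · simp [pvStepA, h, List.find?_cons_of_pos h, pv_foldl_both_some]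
    · simp [pvStepA, h, List.find?_cons_of_neg (by simpa using h), ih]

-- With bgv already set, the rest of the loop only searches for the first lead match.
theorem pv_foldl_bgv_some (l : List (String × String × Int)) (b : String) :
    l.foldl pvStepA (none, some b) = ((l.find? pvLeadMatch).map (fun e => e.1), some b) := by
  induction l with
  | nil => rfl
  | cons e t ih =>
    by_cases h : pvLeadMatch e = true
    · simp [pvStepA, h, List.find?_cons_of_pos h, pv_foldl_both_some]
    · simp [pvStepA, h, List.find?_cons_of_neg (by simpa using h), ih]

-- On a tail whose ids avoid c, B's id-exclusion filter is vacuous.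
theorem pv_find?_skip_id (t : List (String × String × Int)) (c : String)
    (hc : ∀ x ∈ t, x.1 ≠ c) :
    t.find? (fun e => (some e.1 != some c) && pvLeadMatch e) = t.find? pvLeadMatch := by
  induction t with
  | nil => rfl
  | cons e r ih =>
    have he : e.1 ≠ c := hc e (by simp)
    have hne : (some e.1 != some c) = true := by simpa using he
    have ih' := ih (fun x hx => hc x (by simp [hx]))
    by_cases h : pvLeadMatch e = true
    · rw [List.find?_cons_of_pos (by simp [hne, h]), List.find?_cons_of_pos h]
    · rw [List.find?_cons_of_neg (by simp [h]), List.find?_cons_of_neg (by simpa using h), ih']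

theorem pv_main (l : List (String × String × Int))
    (hnd : (l.map (fun e => e.1)).Nodup) :
    l.foldl pvStepA (none, none) = detect_vocal_category_ids_py_alt l := by
  induction l with
  | nil => rfl
  | cons e t ih =>
    rw [List.map_cons, List.nodup_cons] at hnd
    obtain ⟨hnotin, hndt⟩ := hnd
    have hfresh : ∀ x ∈ t, x.1 ≠ e.1 := by
      intro x hx h
      exact hnotin (h ▸ List.mem_map_of_mem hx)
    by_cases hb : pvBgvMatch e = true
    · -- head wins bgv; A searches the tail for lead, B excludes the head by id
      have hA : (e :: t).foldl pvStepA (none, none)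
          = ((t.find? pvLeadMatch).map (fun x => x.1), some e.1) := by
        simp [List.foldl_cons, pvStepA, hb, pv_foldl_bgv_some]
      rw [hA]
      simp only [detect_vocal_category_ids_py_alt, List.find?_cons_of_pos hb, Option.map_some]
      rw [List.find?_cons_of_neg (by simp), pv_find?_skip_id t e.1 hfresh]
    · by_cases hl : pvLeadMatch e = true
      · -- head wins lead; A searches the tail for bgv
        have hA : (e :: t).foldl pvStepA (none, none)
            = (some e.1, (t.find? pvBgvMatch).map (fun x => x.1)) := by
          simp [List.foldl_cons, pvStepA, hb, hl, pv_foldl_lead_some]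
        rw [hA]
        simp only [detect_vocal_category_ids_py_alt,
          List.find?_cons_of_neg (by simpa using hb)]
        have hne : (some e.1 != (t.find? pvBgvMatch).map (fun x => x.1)) = true := by
          cases hfind : t.find? pvBgvMatch with
          | none => simp
          | some x =>
            have hx : x ∈ t := List.mem_of_find?_eq_some hfind
            simpa using fun h => hfresh x hx h.symm
        rw [List.find?_cons_of_pos (by simp [hne, hl])]
        simp
      · -- head matches nothing: both sides ignore it
        have hA : (e :: t).foldl pvStepA (none, none) = t.foldl pvStepA (none, none) := by
          simp [List.foldl_cons, pvStepA, hb, hl]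
        rw [hA, ih hndt]
        simp only [detect_vocal_category_ids_py_alt,
          List.find?_cons_of_neg (by simpa using hb)]
        rw [List.find?_cons_of_neg (by simp [hl])]

-- ===== VERDICT (by name: the statement is the Claim_ definition above) =====
theorem detect_vocal_category_ids_py_spec : Claim_equal_detect_vocal_category_ids_py := by
  intro cm _ hpre
  unfold Spec_detect_vocal_category_ids_py detect_vocal_category_ids_py
  exact pv_main cm hpre
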